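-- pv_equiv track=rewrite | github.com/danielegos/nGlycan | N-Glycan_DCI_0.01.py | find_node_degrees
-- ===== SOURCE A (Python) =====
-- def find_node_degrees(edges):
--     """Computes the degree of each node in the graph."""
--     graph = {}
--     for edge in edges.values():
--         a, b = edge
--         if a not in graph:
--             graph[a] = []
--         if b not in graph:
--             graph[b] = []
--         graph[a].append(b)
--         graph[b].append(a)
--
--     return {node: len(neighbors) for node, neighbors in graph.items()}
-- ===== SOURCE B (Python) =====
-- def find_node_degrees(edges):
--     """Computes the degree of each node in the graph.
--
--     Staged approach: flatten both endpoints of every edge into one stream,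
--     then the degree of a node is simply how often it occurs in that stream.
--     """
--     endpoints = [x for edge in edges.values() for x in edge]
--     return {node: endpoints.count(node) for node in dict.fromkeys(endpoints)}
-- ===== Notes on version B (the rewrite author's own statement) =====
-- stated objective: alternative
-- what changed: Replaces A's incrementally built adjacency-list dict (append to both endpoints' neighbor lists, then a len pass) by a staged computation: flatten all edge endpoints into one stream and define each distinct node's degree as its occurrence count in that stream via list.count.
import Mathlib
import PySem

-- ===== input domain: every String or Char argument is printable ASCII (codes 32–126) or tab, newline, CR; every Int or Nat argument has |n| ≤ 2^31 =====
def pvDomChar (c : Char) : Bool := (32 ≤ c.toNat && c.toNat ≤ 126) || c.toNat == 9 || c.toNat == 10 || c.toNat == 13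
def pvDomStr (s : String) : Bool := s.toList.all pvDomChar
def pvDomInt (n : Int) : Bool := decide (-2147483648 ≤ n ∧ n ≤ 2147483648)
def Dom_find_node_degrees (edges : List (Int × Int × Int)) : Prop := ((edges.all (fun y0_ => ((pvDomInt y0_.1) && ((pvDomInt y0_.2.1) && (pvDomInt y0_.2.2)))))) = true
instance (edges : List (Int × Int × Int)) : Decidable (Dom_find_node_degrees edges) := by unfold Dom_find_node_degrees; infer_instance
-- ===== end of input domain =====

-- B replaces A's incrementally built adjacency-list dict by a staged computation: flatten all
-- edge endpoints into one stream and read each distinct node's degree off as its occurrence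
-- count in that stream (objective: alternative).

-- ===== PORT A =====
-- the input dict[int, tuple[int,int]] arrives as an association list; both ports read its values
-- through PySem.Dict.ofList, which models Python's dict construction (duplicate keys overwrite).
def find_node_degrees (edges : List (Int × Int × Int)) : List (Int × Int) :=
  let graph : PySem.Dict Int (List Int) :=
    (PySem.Dict.ofList edges).values.foldl
      (fun g ab =>
        let g := if g.contains ab.1 then g else g.insert ab.1 []
        let g := if g.contains ab.2 then g else g.insert ab.2 []
        let g := g.modify ab.1 [] (· ++ [ab.2])
        g.modify ab.2 [] (· ++ [ab.1]))
      PySem.Dict.empty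
  graph.items.map (fun p => (p.1, (p.2.length : Int)))

-- ===== PORT B =====
-- endpoints = [x for edge in edges.values() for x in edge];
-- {node: endpoints.count(node) for node in dict.fromkeys(endpoints)}
def find_node_degrees_alt (edges : List (Int × Int × Int)) : List (Int × Int) :=
  let endpoints := (PySem.Dict.ofList edges).values.flatMap (fun ab => [ab.1, ab.2])
  (PySem.List.dedup endpoints).map (fun node => (node, (endpoints.count node : Int)))

-- ===== PRECONDITION & SPEC =====
def Spec_find_node_degrees (edges : List (Int × Int × Int)) (out : List (Int × Int)) : Prop := out = find_node_degrees_alt edges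
instance (edges : List (Int × Int × Int)) (out : List (Int × Int)) : Decidable (Spec_find_node_degrees edges out) := by unfold Spec_find_node_degrees; infer_instance

-- ===== CLAIM (what is proved, stated in full; the proofs are below) =====
def Claim_equal_find_node_degrees : Prop := ∀ (edges : List (Int × Int × Int)), Dom_find_node_degrees edges → Spec_find_node_degrees edges (find_node_degrees edges)

-- ===== LEMMAS AND PROOFS =====

-- abbreviation-free restatement of A's loop body
def stepA (g : PySem.Dict Int (List Int)) (ab : Int × Int) : PySem.Dict Int (List Int) :=
  let g := if g.contains ab.1 then g else g.insert ab.1 []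
  let g := if g.contains ab.2 then g else g.insert ab.2 []
  let g := g.modify ab.1 [] (· ++ [ab.2])
  g.modify ab.2 [] (· ++ [ab.1])

theorem modify_eq_insert (d : PySem.Dict Int (List Int)) (k : Int) (f : List Int → List Int) :
    d.modify k [] f = d.insert k (f (d.getD k [])) := rfl

theorem keys_insertAny (d : PySem.Dict Int (List Int)) (x : Int) (v : List Int) :
    (d.insert x v).keys = PySem.Set.add d.keys x := by
  by_cases h : d.contains x = true
  · rw [PySem.Dict.keys_insert_of_contains d v h,
        PySem.Set.add_of_mem ((PySem.Dict.contains_iff_mem_keys d x).mp h)]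
  · rw [PySem.Dict.keys_insert_of_not_contains d v (by simpa using h),
        PySem.Set.add_of_not_mem (fun hm => h ((PySem.Dict.contains_iff_mem_keys d x).mpr hm))]

theorem keys_touch (g : PySem.Dict Int (List Int)) (x : Int) :
    (if g.contains x then g else g.insert x []).keys = PySem.Set.add g.keys x := by
  by_cases h : g.contains x = true
  · simp [h, PySem.Set.add_of_mem ((PySem.Dict.contains_iff_mem_keys g x).mp h)]
  · simp only [h, Bool.false_eq_true, if_false]
    exact keys_insertAny g x []

theorem getD_touch (g : PySem.Dict Int (List Int)) (x k : Int) :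
    (if g.contains x then g else g.insert x []).getD k [] = g.getD k [] := by
  by_cases h : g.contains x = true
  · simp [h]
  · simp only [h, Bool.false_eq_true, if_false]
    rw [PySem.Dict.getD_insert]
    split_ifs with hk
    · subst hk; rw [PySem.Dict.getD_of_not_contains g [] (by simpa using h)]
    · rfl

theorem keys_stepA (g : PySem.Dict Int (List Int)) (ab : Int × Int) :
    (stepA g ab).keys = PySem.Set.add (PySem.Set.add g.keys ab.1) ab.2 := by
  unfold stepA
  simp only [modify_eq_insert, keys_insertAny, keys_touch]
  rw [PySem.Set.add_of_mem (by simp [PySem.Set.mem_add]),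
      PySem.Set.add_of_mem (by simp [PySem.Set.mem_add])]

theorem getD_stepA (g : PySem.Dict Int (List Int)) (ab : Int × Int) (k : Int) :
    ((stepA g ab).getD k []).length = (g.getD k []).length + ([ab.1, ab.2].count k) := by
  unfold stepA
  simp only [modify_eq_insert, PySem.Dict.getD_insert, getD_touch]
  split_ifs <;> (try simp_all [List.count_cons]) <;> omega

theorem keys_foldA (l : List (Int × Int)) (g : PySem.Dict Int (List Int)) :
    (l.foldl stepA g).keys = PySem.Set.update g.keys (l.flatMap (fun ab => [ab.1, ab.2])) := by
  induction l generalizing g with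
  | nil => rfl
  | cons hd tl ih =>
      simp [List.flatMap_cons, PySem.Set.update_cons, ih, keys_stepA]

theorem len_foldA (l : List (Int × Int)) (g : PySem.Dict Int (List Int)) (k : Int) :
    (((l.foldl stepA g).getD k []).length)
      = (g.getD k []).length + (l.flatMap (fun ab => [ab.1, ab.2])).count k := by
  induction l generalizing g with
  | nil => simp
  | cons hd tl ih =>
      simp [List.flatMap_cons, List.foldl_cons, ih, getD_stepA, List.count_cons]
      omega

-- ===== VERDICT (by name: the statement is the Claim_ definition above) =====
theorem find_node_degrees_spec : Claim_equal_find_node_degrees := by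
  intro edges _
  unfold Spec_find_node_degrees find_node_degrees find_node_degrees_alt
  set l := (PySem.Dict.ofList edges).values with hl
  set s := l.flatMap (fun ab => [ab.1, ab.2]) with hs
  have hfold : (l.foldl
      (fun g ab =>
        let g := if g.contains ab.1 then g else g.insert ab.1 []
        let g := if g.contains ab.2 then g else g.insert ab.2 []
        let g := g.modify ab.1 [] (· ++ [ab.2])
        g.modify ab.2 [] (· ++ [ab.1]))
      PySem.Dict.empty) = l.foldl stepA PySem.Dict.empty := rfl
  rw [hfold]
  change (List.foldl stepA PySem.Dict.empty l).items.map (fun p => (p.1, (p.2.length : Int)))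
      = (PySem.List.dedup s).map (fun node => (node, (s.count node : Int)))
  have hkeys : (l.foldl stepA PySem.Dict.empty).keys = PySem.Set.ofList s := by
    rw [keys_foldA]; simp [PySem.Dict.keys_empty, PySem.Set.update_nil_left, hs]
  have hnd : (l.foldl stepA PySem.Dict.empty).keys.Nodup := by
    rw [hkeys]; exact PySem.Set.nodup_ofList s
  rw [PySem.Dict.items_eq_map_keys _ hnd ([] : List Int), hkeys, List.map_map]
  simp only [PySem.List.dedup_eq_ofList]
  apply List.map_congr_left
  intro k _
  simp [len_foldA, PySem.Dict.getD_empty, hs]
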